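/-
  THE LANGUAGE jsmn ACCEPTS, PART 1: THE LEXER
  (files: AcceptLang = the lexer · AcceptLangCount = counting mode, exact, both builds · AcceptLangTok + AcceptLangTokMain = token mode of the
  default build, exact · AcceptLangStrict + AcceptLangStrictSim + AcceptLangStrictMain = token mode of the strict build with parent links,
  exact · AcceptLangRules = which rules of RFC 8259 are not enforced, as general theorems · AcceptTable = 106 concrete inputs)

  jsmn looks at a text one byte at a time and is, at any moment, in one of four situations (`Mode`): between tokens, inside a primitive,
  inside a string, just behind a backslash. `lex` below is that automaton written as a plain recursive function on the list of bytes. It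
  answers the list of ITEMS it saw (brackets, colons, commas, one `str` per string, one `prim` per primitive) and how the text ENDED:
      eof    the end of the text (or a NUL byte, which jsmn takes for the end),
      inval  a byte that is not allowed where it stands     (jsmn_parse answers JSMN_ERROR_INVAL, -2),
      part   the text stops inside a string; in strict mode also: inside a primitive     (JSMN_ERROR_PART, -3).

  COUNTING MODE (tokens == NULL) does nothing else: `count_mode` (AcceptLangCount.lean) proves, for both builds and every text shorter than 2^31 bytes,
      jsmn_parse = the number of `{` `[` strings and primitives       if the text ends with `eof`,
                   -2 / -3                                             if it ends with `inval` / `part`.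
  So the counting mode accepts ANY sequence of brackets, colons, commas, strings and primitives, in any order and any nesting.

  THE GRAMMAR `lex` IMPLEMENTS (ws = tab CR LF space; stop = ws , ] } and, not in strict mode, : ; printable = 21H … 7EH):
      text   = { ws | '{' | '}' | '[' | ']' | ':' | ',' | string | prim }  [ NUL anything ]
      string = '"' { any byte but NUL " \  |  '\' (" / \ b f r n t)  |  '\u' hex hex hex hex } '"'
      prim   = first { printable but not stop }      followed by a stop character, or (not in strict mode) by the end of the text / a NUL
               first: not strict: any printable byte but { } [ ] " : ,          strict: - 0 … 9 t f n
  Rejected with -2: a byte below 20H or above 7EH in a primitive; a bad escape in a string; in strict mode a token starting with another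
  byte. Rejected with -3: an unterminated string (also: a `\u` escape cut short by the end of the text); in strict mode a primitive that
  runs to the end of the text.

  WHAT OF RFC 8259 IS NOT ENFORCED by this lexer (and by nothing else in jsmn): the syntax of numbers and the spelling of true / false /
  null (a primitive is any run of printable bytes; it may contain `"` `{` `[`, in strict mode `:`); control characters inside strings
  (every byte but NUL `"` `\` is allowed there, UTF-8 is not checked); see Json/Jsmn/AcceptTable.lean for an example of each.
-/
import Json.Jsmn.Model
set_option linter.unusedSimpArgs false

namespace Jsmn.AcceptLang
open Jsmn

/-- What jsmn is in the middle of. -/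
inductive Mode where
  /-- between tokens (the `switch` of jsmn_parse) -/
  | top
  /-- inside a primitive (the loop of jsmn_parse_primitive) -/
  | prim
  /-- inside a string (the loop of jsmn_parse_string); `h` hex digits of a `\u` escape are still to come (0: none) -/
  | str (h : Nat)
  /-- inside a string, just behind a backslash -/
  | esc
deriving DecidableEq, Repr

/-- What the lexer reports. `str` / `prim` are reported where the string / primitive STARTS. -/
inductive Item where
  | objOpen | arrOpen | objClose | arrClose | colon | comma | str | prim
deriving DecidableEq, Repr

/-- How the text ended. -/
inductive Ending where
  | eof | inval | part
deriving DecidableEq, Repr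

/-- Put an item in front of what the rest of the text gives. -/
def push (i : Item) (r : List Item × Ending) : List Item × Ending := (i :: r.1, r.2)

/-- Tab, CR, LF, space. -/
def isWs (c : UInt8) : Bool := c == 0x09 || c == 0x0d || c == 0x0a || c == 0x20

/-- A byte that may not occur in a primitive: below 20H or above 7EH. -/
def notPrintable (c : UInt8) : Bool := c.toNat < 32 || c.toNat ≥ 127

/-- **The lexer of jsmn** (`strict`: built with JSMN_STRICT). -/
def lex (strict : Bool) : Mode → List UInt8 → List Item × Ending
  | .top, [] => ([], .eof)
  | .top, c :: rest =>
    if c == 0 then ([], .eof)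
    else if c == 0x7b then push .objOpen (lex strict .top rest)
    else if c == 0x5b then push .arrOpen (lex strict .top rest)
    else if c == 0x7d then push .objClose (lex strict .top rest)
    else if c == 0x5d then push .arrClose (lex strict .top rest)
    else if c == 0x22 then push .str (lex strict (.str 0) rest)
    else if isWs c then lex strict .top rest
    else if c == 0x3a then push .colon (lex strict .top rest)
    else if c == 0x2c then push .comma (lex strict .top rest)
    else if strict then (if primStart c then push .prim (lex strict .prim rest) else ([], .inval))
    else if notPrintable c then ([], .inval)
    else push .prim (lex strict .prim rest)
  | .prim, [] => ([], if strict then .part else .eof)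
  | .prim, c :: rest =>
    if c == 0 then ([], if strict then .part else .eof)
    else if isWs c then lex strict .top rest
    else if c == 0x2c then push .comma (lex strict .top rest)
    else if c == 0x5d then push .arrClose (lex strict .top rest)
    else if c == 0x7d then push .objClose (lex strict .top rest)
    else if !strict && c == 0x3a then push .colon (lex strict .top rest)
    else if notPrintable c then ([], .inval)
    else lex strict .prim rest
  | .str _, [] => ([], .part)
  | .str h, c :: rest =>
    if c == 0 then ([], .part)
    else match h with
      | h + 1 => if isHex c then lex strict (.str h) rest else ([], .inval)
      | 0 =>
        if c == 0x22 then lex strict .top rest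
        else if c == 0x5c then lex strict .esc rest
        else lex strict (.str 0) rest
  | .esc, [] => ([], .part)
  | .esc, e :: rest =>
    if isSimpleEscape e then lex strict (.str 0) rest
    else if e == 0x75 then lex strict (.str 4) rest
    else ([], .inval)

/-- The items that become tokens: `{` `[` strings primitives. -/
def Item.isToken : Item → Bool
  | .objOpen | .arrOpen | .str | .prim => true
  | _ => false

/-- The number of tokens among the items. -/
def tokCount (items : List Item) : Nat := (items.filter Item.isToken).length

/-- What the counting mode answers. -/
def countResult (r : List Item × Ending) : Int :=
  match r.2 with
  | .eof => tokCount r.1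
  | .inval => JSMN_ERROR_INVAL
  | .part => JSMN_ERROR_PART

/-- An ASCII text as bytes (for the examples). -/
def ascii (s : String) : List UInt8 := s.toList.map fun c => UInt8.ofNat c.toNat

example : lex false .top (ascii "{a:1} [tru,\"x\\n\\u00e9\"]") =
    ([.objOpen, .prim, .colon, .prim, .objClose, .arrOpen, .prim, .comma, .str, .arrClose], .eof) := by decide
example : lex true .top (ascii "[1:2]") = ([.arrOpen, .prim, .arrClose], .eof) := by decide
example : lex true .top (ascii "42") = ([.prim], .part) := by decide
example : lex true .top (ascii "{a:1}") = ([.objOpen], .inval) := by decide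
example : lex false .top (ascii "\"\\u00") = ([.str], .part) := by decide
example : lex false .top (ascii "\"\\u00\"") = ([.str], .inval) := by decide

/-! ### The three scanning loops of jsmn are the lexer's modes -/

theorem u32_succ {x : Nat} (h : x + 1 < 4294967296) : u32 ((x : Int) + 1) = x + 1 := by
  unfold u32; omega
theorem u32_pred {x : Nat} (h0 : 1 ≤ x) (h : x < 4294967296) : u32 ((x : Int) - 1) = x - 1 := by
  unfold u32; omega

/-- The text from position `pos` on is empty: the loop test fails. -/
theorem more_of_drop_nil {js : List UInt8} {pos : Nat} (h : js.drop pos = []) : more js pos = false := by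
  have : js.length ≤ pos := by simpa using h
  simp [more]; omega

/-- The text from position `pos` on is `c :: t`. -/
theorem of_drop_cons {js : List UInt8} {pos : Nat} {c : UInt8} {t : List UInt8} (h : js.drop pos = c :: t) :
    pos < js.length ∧ charAt js pos = c ∧ js.drop (pos + 1) = t ∧ more js pos = (c != 0) := by
  have hlt : pos < js.length := by
    by_cases hp : pos < js.length
    · exact hp
    · have : js.drop pos = [] := by simp; omega
      rw [this] at h; cases h
  rw [List.drop_eq_getElem_cons hlt] at h
  injection h with h1 h2
  refine ⟨hlt, ?_, h2, ?_⟩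
  · simp [charAt, hlt, h1]
  · simp [more, charAt, hlt, h1]


/-- The `\u` loop of jsmn_parse_string is the lexer's `str k` mode. -/
theorem hexScan_sim (strict : Bool) (js : List UInt8) (hL : js.length < 2147483648) : ∀ k pos, pos ≤ js.length →
    (hexScan js k pos = none → lex strict (.str k) (js.drop pos) = ([], .inval)) ∧
    (∀ q, hexScan js k pos = some q → pos ≤ q ∧ q ≤ js.length ∧ lex strict (.str k) (js.drop pos) = lex strict (.str 0) (js.drop q)) := by
  intro k
  induction k with
  | zero => intro pos hp; simp [hexScan]; omega
  | succ k ih =>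
    intro pos hp
    rw [hexScan]
    cases hd : js.drop pos with
    | nil => simp [more_of_drop_nil hd, lex, hd]; omega
    | cons c t =>
      obtain ⟨hlt, hc, ht, hm⟩ := of_drop_cons hd
      by_cases h0 : c = 0
      · simp [hm, h0, lex, hd]; omega
      · have hm' : more js pos = true := by simp [hm, h0]
        by_cases hh : isHex c = true
        · have := ih (pos + 1) (by omega)
          simp only [hm', hc, hh, if_true, u32_succ (show pos + 1 < 4294967296 by omega)]
          rw [ht] at this
          refine ⟨fun h => ?_, fun q h => ?_⟩
          · simp [lex, h0, hh, this.1 h]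
          · obtain ⟨h1, h2, h3⟩ := this.2 q h
            refine ⟨by omega, h2, ?_⟩
            simp [lex, h0, hh, h3]
        · simp [hm', hc, hh, lex, h0]

/-- What an answer of the loop of jsmn_parse_string, started at `pos`, says about the lexer in `str 0` mode there. -/
def StrRel (strict : Bool) (js : List UInt8) (pos : Nat) : StrScan → Prop
  | .quote q => pos ≤ q ∧ q < js.length ∧ lex strict (.str 0) (js.drop pos) = lex strict .top (js.drop (q + 1))
  | .bad => lex strict (.str 0) (js.drop pos) = ([], .inval)
  | .eoi => lex strict (.str 0) (js.drop pos) = ([], .part)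

/-- The loop of jsmn_parse_string is the lexer's `str` / `esc` modes; `js.length - pos + 1` rounds are enough. -/
theorem strScan_sim (strict : Bool) (js : List UInt8) (hL : js.length < 2147483648) : ∀ fuel pos, pos ≤ js.length → js.length - pos < fuel →
    ∃ r, strScan js fuel pos = some r ∧ StrRel strict js pos r := by
  intro fuel
  induction fuel with
  | zero => intro pos _ h; omega
  | succ fuel ih =>
    intro pos hp hf
    rw [strScan]
    cases hd : js.drop pos with
    | nil => exact ⟨.eoi, by simp [more_of_drop_nil hd], by simp [StrRel, hd, lex]⟩
    | cons c t =>
      obtain ⟨hlt, hc, ht, hm⟩ := of_drop_cons hd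
      have hu : u32 ((pos : Int) + 1) = pos + 1 := u32_succ (by omega)
      by_cases h0 : c = 0
      · exact ⟨.eoi, by simp [hm, h0], by simp [StrRel, hd, lex, h0]⟩
      have hm' : more js pos = true := by simp [hm, h0]
      simp only [hm', hc, if_true, hu]
      by_cases hq : c = 0x22
      · exact ⟨.quote pos, by simp [hq], by simp [StrRel, hd, lex, hq, ht]; omega⟩
      by_cases hb : c = 0x5c
      · by_cases hl : pos + 1 < js.length
        · -- an escape
          cases hd1 : js.drop (pos + 1) with
          | nil => have : js.length ≤ pos + 1 := by simpa using hd1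
                   omega
          | cons e t' =>
            obtain ⟨hlt1, hc1, ht1, hm1⟩ := of_drop_cons hd1
            have hu2 : u32 ((pos : Int) + 1 + 1) = pos + 1 + 1 := by unfold u32; omega
            have ht' : t = e :: t' := by rw [← ht, hd1]
            by_cases hs : isSimpleEscape e = true
            · obtain ⟨r, hr, hrel⟩ := ih (pos + 1 + 1) (by omega) (by omega)
              refine ⟨r, by simp [hq, hb, hl, hc1, hs, hr, hu2], ?_⟩
              have hlex : lex strict (.str 0) (js.drop pos) = lex strict (.str 0) (js.drop (pos + 1 + 1)) := by
                simp [hd, ht', lex, hb, hs, ht1]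
              cases r <;> simp only [StrRel] at hrel ⊢
              · exact ⟨by omega, hrel.2.1, hlex ▸ hrel.2.2⟩
              · exact hlex ▸ hrel
              · exact hlex ▸ hrel
            by_cases hu' : e = 0x75
            · subst hu'
              have hx := hexScan_sim strict js hL 4 (pos + 1 + 1) (by omega)
              have hlex : lex strict (.str 0) (js.drop pos) = lex strict (.str 4) (js.drop (pos + 1 + 1)) := by
                simp [hd, ht', lex, hb, ht1, isSimpleEscape]
              cases hh : hexScan js 4 (pos + 1 + 1) with
              | none => exact ⟨.bad, by simp [hq, hb, hl, hc1, hs, hu2, hh], by simp [StrRel, hlex, hx.1 hh]⟩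
              | some q =>
                obtain ⟨hq1, hq2, hq3⟩ := hx.2 q hh
                have hu3 : u32 ((u32 ((q : Int) - 1) : Nat) + 1) = q := by unfold u32; omega
                obtain ⟨r, hr, hrel⟩ := ih q hq2 (by omega)
                refine ⟨r, by simp [hq, hb, hl, hc1, hs, hu2, hh, hu3, hr], ?_⟩
                have hlex' : lex strict (.str 0) (js.drop pos) = lex strict (.str 0) (js.drop q) := hlex.trans hq3
                cases r <;> simp only [StrRel] at hrel ⊢
                · exact ⟨by omega, hrel.2.1, hlex' ▸ hrel.2.2⟩
                · exact hlex' ▸ hrel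
                · exact hlex' ▸ hrel
            · exact ⟨.bad, by simp [hq, hb, hl, hc1, hs, hu', hu2], by simp [StrRel, hd, ht', lex, hb, hs, hu']⟩
        · -- a backslash as the last byte of the text is skipped like any other byte
          obtain ⟨r, hr, hrel⟩ := ih (pos + 1) (by omega) (by omega)
          have ht0 : t = [] := by rw [← ht]; simp; omega
          refine ⟨r, by simp [hq, hb, hl, hr], ?_⟩
          have hlex : lex strict (.str 0) (js.drop pos) = lex strict (.str 0) (js.drop (pos + 1)) := by
            simp [hd, ht, ht0, lex, hb]
          cases r <;> simp only [StrRel] at hrel ⊢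
          · exact ⟨by omega, hrel.2.1, hlex ▸ hrel.2.2⟩
          · exact hlex ▸ hrel
          · exact hlex ▸ hrel
      · obtain ⟨r, hr, hrel⟩ := ih (pos + 1) (by omega) (by omega)
        refine ⟨r, by simp [hq, hb, hr], ?_⟩
        have hlex : lex strict (.str 0) (js.drop pos) = lex strict (.str 0) (js.drop (pos + 1)) := by
          simp [hd, ht, lex, hb, hq, h0]
        cases r <;> simp only [StrRel] at hrel ⊢
        · exact ⟨by omega, hrel.2.1, hlex ▸ hrel.2.2⟩
        · exact hlex ▸ hrel
        · exact hlex ▸ hrel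

/-- At a stop character the lexer leaves a primitive and treats the character as the top level does. -/
theorem lex_prim_stop (cfg : Config) (c : UInt8) (t : List UInt8) (h0 : c ≠ 0) (hs : primStop cfg c = true) :
    lex cfg.strict .prim (c :: t) = lex cfg.strict .top (c :: t) := by
  simp only [primStop, Bool.or_eq_true, Bool.and_eq_true, Bool.not_eq_true', beq_iff_eq] at hs
  rcases hs with ((((((⟨h1, h2⟩ | h) | h) | h) | h) | h) | h) | h <;> subst_vars <;> simp [lex, isWs, *]

/-- What an answer of the loop of jsmn_parse_primitive, started at `pos`, says about the lexer in `prim` mode there. -/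
def PrimRel (cfg : Config) (js : List UInt8) (pos : Nat) : PrimScan → Prop
  | .found q => pos ≤ q ∧ q < js.length ∧ primStop cfg (charAt js q) = true ∧
      lex cfg.strict .prim (js.drop pos) = lex cfg.strict .top (js.drop q) ∧ (pos < q → notPrintable (charAt js pos) = false)
  | .bad => lex cfg.strict .prim (js.drop pos) = ([], .inval)
  | .eoi q => pos ≤ q ∧ q ≤ js.length ∧ more js q = false ∧
      lex cfg.strict .prim (js.drop pos) = ([], if cfg.strict then .part else .eof) ∧ (pos < q → notPrintable (charAt js pos) = false)

/-- The loop of jsmn_parse_primitive is the lexer's `prim` mode; `js.length - pos + 1` rounds are enough. -/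
theorem primScan_sim (cfg : Config) (js : List UInt8) (hL : js.length < 2147483648) : ∀ fuel pos, pos ≤ js.length → js.length - pos < fuel →
    ∃ r, primScan cfg js fuel pos = some r ∧ PrimRel cfg js pos r := by
  intro fuel
  induction fuel with
  | zero => intro pos _ h; omega
  | succ fuel ih =>
    intro pos hp hf
    rw [primScan]
    cases hd : js.drop pos with
    | nil =>
      have hm := more_of_drop_nil hd
      exact ⟨.eoi pos, by simp [hm], by simp [PrimRel, hd, lex, hm, hp]⟩
    | cons c t =>
      obtain ⟨hlt, hc, ht, hm⟩ := of_drop_cons hd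
      have hu : u32 ((pos : Int) + 1) = pos + 1 := u32_succ (by omega)
      by_cases h0 : c = 0
      · have hm0 : more js pos = false := by simp [hm, h0]
        exact ⟨.eoi pos, by simp [hm0], by simp [PrimRel, hd, lex, h0, hm0, hp]⟩
      have hm' : more js pos = true := by simp [hm, h0]
      simp only [hm', hc, if_true, hu]
      by_cases hs : primStop cfg c = true
      · exact ⟨.found pos, by simp [hs], by simp [PrimRel, hd, hc, hs, hlt, lex_prim_stop cfg c t h0 hs]⟩
      by_cases hb : (c.toNat < 32 || c.toNat ≥ 127) = true
      · refine ⟨.bad, by simp [hs, hb], ?_⟩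
        simp only [primStop, Bool.or_eq_true, Bool.and_eq_true, Bool.not_eq_true', beq_iff_eq, not_or, not_and] at hs
        simp only [PrimRel, hd, lex]
        have hb' : notPrintable c = true := hb
        simp [h0, isWs, hs, hb']
        intro h1 h2; exact absurd h2 (hs.1.1.1.1.1.1.1 h1)
      · obtain ⟨r, hr, hrel⟩ := ih (pos + 1) (by omega) (by omega)
        refine ⟨r, by simp [hs, hb, hr], ?_⟩
        have hlex : lex cfg.strict .prim (js.drop pos) = lex cfg.strict .prim (js.drop (pos + 1)) := by
          simp only [primStop, Bool.or_eq_true, Bool.and_eq_true, Bool.not_eq_true', beq_iff_eq, not_or, not_and] at hs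
          have hb' : notPrintable c = false := by simpa [notPrintable] using hb
          rw [hd, ht]
          simp only [lex]
          simp [h0, isWs, hs, hb']
          intro h1 h2; exact absurd h2 (hs.1.1.1.1.1.1.1 h1)
        have hb' : notPrintable (charAt js pos) = false := by simpa [notPrintable, hc] using hb
        cases r <;> simp only [PrimRel] at hrel ⊢
        · exact ⟨by omega, hrel.2.1, hrel.2.2.1, hlex ▸ hrel.2.2.2.1, fun _ => hb'⟩
        · exact hlex ▸ hrel
        · exact ⟨by omega, hrel.2.1, hrel.2.2.1, hlex ▸ hrel.2.2.2.1, fun _ => hb'⟩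

/-- Where the loop test fails, the lexer (between tokens) is at the end. -/
theorem lex_top_of_not_more (strict : Bool) {js : List UInt8} {pos : Nat} (h : more js pos = false) :
    lex strict .top (js.drop pos) = ([], .eof) := by
  cases hd : js.drop pos with
  | nil => simp [lex]
  | cons c t =>
    obtain ⟨_, _, _, hm⟩ := of_drop_cons hd
    have : c = 0 := by simpa [hm] using h
    simp [lex, this]

/-- (for the next proof) the lexer's answer has at most `k` tokens -/
def AtMost (k : Nat) (r : List Item × Ending) : Prop := tokCount r.1 ≤ k
theorem AtMost.ite {k : Nat} {c : Prop} [Decidable c] {a b : List Item × Ending} (ha : AtMost k a) (hb : AtMost k b) :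
    AtMost k (if c then a else b) := by split <;> assumption
theorem AtMost.push {k : Nat} (i : Item) {r : List Item × Ending} (h : AtMost k r) : AtMost (k + 1) (push i r) := by
  simp only [AtMost, AcceptLang.push, tokCount, List.filter_cons] at *
  split
  · simp only [List.length_cons]; omega
  · omega
theorem AtMost.succ {k : Nat} {r : List Item × Ending} (h : AtMost k r) : AtMost (k + 1) r := Nat.le_succ_of_le h
theorem AtMost.nil {k : Nat} {e : Ending} : AtMost k ([], e) := by simp [AtMost, tokCount]

/-- Every token takes at least one byte of the text: the lexer never reports more tokens than there are bytes. -/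
theorem tokCount_lex_le (strict : Bool) : ∀ (l : List UInt8) (m : Mode), tokCount (lex strict m l).1 ≤ l.length := by
  intro l
  induction l with
  | nil => intro m; cases m <;> simp [lex, tokCount]
  | cons c t ih =>
    intro m
    show AtMost (t.length + 1) _
    have ih' : ∀ m, AtMost t.length (lex strict m t) := ih
    cases m with
    | top => simp only [lex]; repeat' apply AtMost.ite
             all_goals first | exact AtMost.nil | exact (ih' _).push _ | exact (ih' _).succ
    | prim => simp only [lex]; repeat' apply AtMost.ite
              all_goals first | exact AtMost.nil | exact (ih' _).push _ | exact (ih' _).succ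
    | str h =>
      cases h <;> simp only [lex] <;> repeat' apply AtMost.ite
      all_goals first | exact AtMost.nil | exact (ih' _).push _ | exact (ih' _).succ
    | esc => simp only [lex]; repeat' apply AtMost.ite
             all_goals first | exact AtMost.nil | exact (ih' _).push _ | exact (ih' _).succ

end Jsmn.AcceptLang
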